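-- pv_equiv track=rewrite | github.com/skarthik1015/NLviz | backend/app/services/schema_generator.py | _prioritize_columns
-- ===== SOURCE A (Python) =====
-- def _prioritize_columns(
--     columns: list[dict], ndv: dict[str, int]
-- ) -> list[dict]:
--     """Sort columns for truncation: date > numeric > low-NDV categorical > rest."""
--
--     def sort_key(col: dict) -> tuple[int, str]:
--         col_type = col.get("type", "").upper()
--         col_ndv = ndv.get(col["name"], -1)
--
--         # Date/timestamp columns first
--         if any(t in col_type for t in ("DATE", "TIMESTAMP", "TIME")):
--             return (0, col["name"])
--         # Numeric columns second
--         if any(t in col_type for t in ("INT", "FLOAT", "DECIMAL", "NUMERIC", "DOUBLE", "REAL", "BIGINT")):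
--             return (1, col["name"])
--         # Low-NDV categorical third
--         if 0 < col_ndv < 500:
--             return (2, col["name"])
--         return (3, col["name"])
--
--     return sorted(columns, key=sort_key)
-- ===== SOURCE B (Python) =====
-- def _prioritize_columns(
--     columns: list[dict], ndv: dict[str, int]
-- ) -> list[dict]:
--     """Partition columns into the four priority buckets in one pass, then sort
--     each bucket by name and concatenate (stable-sort equivalent of A)."""
--     buckets = ([], [], [], [])
--     for col in columns:
--         col_type = col.get("type", "").upper()
--         if any(t in col_type for t in ("DATE", "TIMESTAMP", "TIME")):
--             b = 0
--         elif any(t in col_type for t in ("INT", "FLOAT", "DECIMAL", "NUMERIC", "DOUBLE", "REAL", "BIGINT")):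
--             b = 1
--         elif 0 < ndv.get(col["name"], -1) < 500:
--             b = 2
--         else:
--             b = 3
--         buckets[b].append(col)
--     out = []
--     for bucket in buckets:
--         out.extend(sorted(bucket, key=lambda c: c["name"]))
--     return out
-- ===== Notes on version B (the rewrite author's own statement) =====
-- stated objective: alternative
-- what changed: Replaces the single global sort with a tuple key by a one-pass partition into the four priority buckets followed by sorting each bucket by name alone and concatenating; equality holds because the global sort is stable and its key is (bucket, name).
import Mathlib
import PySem

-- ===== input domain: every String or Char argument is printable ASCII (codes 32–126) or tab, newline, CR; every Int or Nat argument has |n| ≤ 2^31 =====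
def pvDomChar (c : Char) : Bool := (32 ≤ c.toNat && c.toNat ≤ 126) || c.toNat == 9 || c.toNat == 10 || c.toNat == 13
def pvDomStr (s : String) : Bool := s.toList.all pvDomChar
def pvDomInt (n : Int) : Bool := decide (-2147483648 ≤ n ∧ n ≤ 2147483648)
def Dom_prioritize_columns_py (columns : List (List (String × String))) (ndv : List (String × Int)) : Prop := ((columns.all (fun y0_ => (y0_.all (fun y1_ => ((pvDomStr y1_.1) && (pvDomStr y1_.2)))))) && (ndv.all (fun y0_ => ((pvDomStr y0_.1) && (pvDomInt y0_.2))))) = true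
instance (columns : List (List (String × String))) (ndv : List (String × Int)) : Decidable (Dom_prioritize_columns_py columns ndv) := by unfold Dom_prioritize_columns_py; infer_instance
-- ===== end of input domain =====

-- B replaces A's single stable sort on the tuple key (bucket, name) by a one-pass
-- partition into four buckets followed by a name-only sort of each bucket (alternative
-- decomposition, same result).

-- ===== PORT A =====
-- col.get("type", "").upper() and col["name"]; col["name"] raises KeyError when the key is
-- absent — excluded by Pre_, so the total form getD … "" is exact on the admitted inputs.
def pvColTypeA (col : List (String × String)) : String :=
  PySem.Str.upper (PySem.Dict.getD ⟨col⟩ "type" "")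

def pvNameA (col : List (String × String)) : String :=
  PySem.Dict.getD ⟨col⟩ "name" ""

def pvSortKeyA (ndv : List (String × Int)) (col : List (String × String)) : Int × String :=
  if PySem.Str.isIn "DATE" (pvColTypeA col) || PySem.Str.isIn "TIMESTAMP" (pvColTypeA col) || PySem.Str.isIn "TIME" (pvColTypeA col) then
    (0, pvNameA col)
  else if PySem.Str.isIn "INT" (pvColTypeA col) || PySem.Str.isIn "FLOAT" (pvColTypeA col) || PySem.Str.isIn "DECIMAL" (pvColTypeA col) || PySem.Str.isIn "NUMERIC" (pvColTypeA col) || PySem.Str.isIn "DOUBLE" (pvColTypeA col) || PySem.Str.isIn "REAL" (pvColTypeA col) || PySem.Str.isIn "BIGINT" (pvColTypeA col) then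
    (1, pvNameA col)
  else if 0 < PySem.Dict.getD ⟨ndv⟩ (pvNameA col) (-1) ∧ PySem.Dict.getD ⟨ndv⟩ (pvNameA col) (-1) < 500 then
    (2, pvNameA col)
  else
    (3, pvNameA col)

def prioritize_columns_py (columns : List (List (String × String))) (ndv : List (String × Int)) : List (List (String × String)) :=
  PySem.List.sorted2 columns (fun c => (pvSortKeyA ndv c).1) (fun c => (pvSortKeyA ndv c).2)

-- ===== PORT B =====
def pvColTypeB (col : List (String × String)) : String :=
  PySem.Str.upper (PySem.Dict.getD ⟨col⟩ "type" "")

def pvNameB (col : List (String × String)) : String :=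
  PySem.Dict.getD ⟨col⟩ "name" ""

def pvBucketB (ndv : List (String × Int)) (col : List (String × String)) : Int :=
  if PySem.Str.isIn "DATE" (pvColTypeB col) || PySem.Str.isIn "TIMESTAMP" (pvColTypeB col) || PySem.Str.isIn "TIME" (pvColTypeB col) then 0
  else if PySem.Str.isIn "INT" (pvColTypeB col) || PySem.Str.isIn "FLOAT" (pvColTypeB col) || PySem.Str.isIn "DECIMAL" (pvColTypeB col) || PySem.Str.isIn "NUMERIC" (pvColTypeB col) || PySem.Str.isIn "DOUBLE" (pvColTypeB col) || PySem.Str.isIn "REAL" (pvColTypeB col) || PySem.Str.isIn "BIGINT" (pvColTypeB col) then 1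
  else if 0 < PySem.Dict.getD ⟨ndv⟩ (pvNameB col) (-1) ∧ PySem.Dict.getD ⟨ndv⟩ (pvNameB col) (-1) < 500 then 2
  else 3

def pvStepB (ndv : List (String × Int))
    (acc : List (List (String × String)) × List (List (String × String)) × List (List (String × String)) × List (List (String × String)))
    (col : List (String × String)) :
    List (List (String × String)) × List (List (String × String)) × List (List (String × String)) × List (List (String × String)) :=
  if pvBucketB ndv col = 0 then (acc.1 ++ [col], acc.2.1, acc.2.2.1, acc.2.2.2)
  else if pvBucketB ndv col = 1 then (acc.1, acc.2.1 ++ [col], acc.2.2.1, acc.2.2.2)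
  else if pvBucketB ndv col = 2 then (acc.1, acc.2.1, acc.2.2.1 ++ [col], acc.2.2.2)
  else (acc.1, acc.2.1, acc.2.2.1, acc.2.2.2 ++ [col])

def prioritize_columns_py_alt (columns : List (List (String × String))) (ndv : List (String × Int)) : List (List (String × String)) :=
  let p := columns.foldl (pvStepB ndv) ([], [], [], [])
  PySem.List.sorted p.1 pvNameB ++ PySem.List.sorted p.2.1 pvNameB ++
    PySem.List.sorted p.2.2.1 pvNameB ++ PySem.List.sorted p.2.2.2 pvNameB

-- ===== PRECONDITION & SPEC =====
-- Pre_ excludes exactly the inputs where A raises KeyError: a column dict without a "name" key.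
def Pre_prioritize_columns_py (columns : List (List (String × String))) (ndv : List (String × Int)) : Prop :=
  ∀ col ∈ columns, PySem.Dict.contains (⟨col⟩ : PySem.Dict String String) "name" = true
instance (columns : List (List (String × String))) (ndv : List (String × Int)) : Decidable (Pre_prioritize_columns_py columns ndv) := by unfold Pre_prioritize_columns_py; infer_instance

def pvWitness_prioritize_columns_py : (List (List (String × String))) × (List (String × Int)) :=
  ([[("name", "b"), ("type", "TEXT")], [("name", "a"), ("type", "DATE")]], [("b", 3)])

def Spec_prioritize_columns_py (columns : List (List (String × String))) (ndv : List (String × Int)) (out : List (List (String × String))) : Prop := out = prioritize_columns_py_alt columns ndv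
instance (columns : List (List (String × String))) (ndv : List (String × Int)) (out : List (List (String × String))) : Decidable (Spec_prioritize_columns_py columns ndv out) := by unfold Spec_prioritize_columns_py; infer_instance

-- ===== CLAIM (what is proved, stated in full; the proofs are below) =====
def Claim_equal_prioritize_columns_py : Prop := ∀ (columns : List (List (String × String))) (ndv : List (String × Int)), Dom_prioritize_columns_py columns ndv → Pre_prioritize_columns_py columns ndv → Spec_prioritize_columns_py columns ndv (prioritize_columns_py columns ndv)

-- ===== LEMMAS AND PROOFS =====

theorem insertBy_nil {α : Type} (before : α → α → Bool) (x : α) :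
    PySem.List.insertBy before x [] = [x] := rfl

theorem insertBy_cons {α : Type} (before : α → α → Bool) (x y : α) (ys : List α) :
    PySem.List.insertBy before x (y :: ys) =
      if before x y then x :: y :: ys else y :: PySem.List.insertBy before x ys := rfl

theorem insertBy_congr {α : Type} (before before' : α → α → Bool) (x : α) (l : List α)
    (hl : ∀ y ∈ l, before x y = before' x y) :
    PySem.List.insertBy before x l = PySem.List.insertBy before' x l := by
  induction l with
  | nil => rfl
  | cons y ys ih =>
      rw [insertBy_cons, insertBy_cons, hl y (by simp), ih (fun z hz => hl z (by simp [hz]))]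

theorem insertBy_append_of_false {α : Type} (before : α → α → Bool) (x : α)
    (l t : List α) (h : ∀ y ∈ l, before x y = false) :
    PySem.List.insertBy before x (l ++ t) = l ++ PySem.List.insertBy before x t := by
  induction l with
  | nil => simp
  | cons y ys ih =>
      rw [List.cons_append, insertBy_cons, h y (by simp)]
      simp only [Bool.false_eq_true, if_false, List.cons_append]
      rw [ih (fun z hz => h z (by simp [hz]))]

theorem insertBy_append_of_true {α : Type} (before before' : α → α → Bool) (x : α)
    (l t : List α) (hl : ∀ y ∈ l, before x y = before' x y)
    (ht : ∀ y ∈ t, before x y = true) :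
    PySem.List.insertBy before x (l ++ t) = PySem.List.insertBy before' x l ++ t := by
  induction l with
  | nil =>
      cases t with
      | nil => simp [insertBy_nil]
      | cons z zs => simp [insertBy_nil, insertBy_cons, ht z (by simp)]
  | cons y ys ih =>
      rw [List.cons_append, insertBy_cons, insertBy_cons, hl y (by simp)]
      by_cases h : before' x y = true
      · simp [h]
      · simp only [h, Bool.false_eq_true, if_false, List.cons_append]
        rw [ih (fun z hz => hl z (by simp [hz]))]

theorem sorted_append_singleton {α : Type} (l : List α) (x : α) (key : α → String) :
    PySem.List.sorted (l ++ [x]) key =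
      PySem.List.insertBy (fun a b => decide (key a < key b)) x (PySem.List.sorted l key) := by
  rw [PySem.List.sorted_eq_foldl_insertBy, PySem.List.sorted_eq_foldl_insertBy, List.foldl_append]
  rfl

theorem sorted2_eq_foldl {α : Type} (xs : List α) (k1 : α → Int) (k2 : α → String) :
    PySem.List.sorted2 xs k1 k2 =
      List.foldl (fun acc x => PySem.List.insertBy
        (fun a b => decide (k1 a < k1 b) || (!decide (k1 b < k1 a) && decide (k2 a < k2 b))) x acc) [] xs := rfl

-- the heart of the equivalence: a stable sort on a (four-valued Int, String) lexicographic
-- key is the concatenation of the name-sorted buckets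
theorem sorted2_bucket4 {α : Type} (xs : List α) (k1 : α → Int) (k2 : α → String)
    (h : ∀ x ∈ xs, k1 x = 0 ∨ k1 x = 1 ∨ k1 x = 2 ∨ k1 x = 3) :
    PySem.List.sorted2 xs k1 k2 =
      PySem.List.sorted (xs.filter (fun x => k1 x == 0)) k2 ++
      PySem.List.sorted (xs.filter (fun x => k1 x == 1)) k2 ++
      PySem.List.sorted (xs.filter (fun x => k1 x == 2)) k2 ++
      PySem.List.sorted (xs.filter (fun x => k1 x == 3)) k2 := by
  induction xs using List.reverseRecOn with
  | nil => rfl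
  | append_singleton xs x ih =>
      have hx := h x (by simp)
      have hxs : ∀ y ∈ xs, k1 y = 0 ∨ k1 y = 1 ∨ k1 y = 2 ∨ k1 y = 3 :=
        fun y hy => h y (by simp [hy])
      have hstep : PySem.List.sorted2 (xs ++ [x]) k1 k2 =
          PySem.List.insertBy
            (fun a b => decide (k1 a < k1 b) || (!decide (k1 b < k1 a) && decide (k2 a < k2 b))) x
            (PySem.List.sorted2 xs k1 k2) := by
        rw [sorted2_eq_foldl, sorted2_eq_foldl, List.foldl_append]
        rfl
      have hmem : ∀ (j : Int) (y : α),
          y ∈ PySem.List.sorted (xs.filter (fun z => k1 z == j)) k2 → k1 y = j := by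
        intro j y hy
        have := (PySem.List.mem_sorted (xs := xs.filter (fun z => k1 z == j))
          (key := k2) (rev := false) (x := y)).mp hy
        simpa using (List.of_mem_filter this)
      have hf : ∀ (j : Int), (xs ++ [x]).filter (fun z => k1 z == j) =
          xs.filter (fun z => k1 z == j) ++ (if k1 x == j then [x] else []) := by
        intro j; rw [List.filter_append, List.filter_singleton]; simp [Bool.cond_eq_if]
      rw [hstep, ih hxs]
      rcases hx with h0 | h1 | h2 | h3
      · -- bucket 0
        rw [List.append_assoc, List.append_assoc,
          insertBy_append_of_true _ (fun a b => decide (k2 a < k2 b)) x _ _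
            (by intro y hy; have := hmem 0 y hy; simp [h0, this])
            (by intro y hy
                simp only [List.mem_append] at hy
                rcases hy with hy | hy | hy
                · have := hmem 1 y hy; simp [h0, this]
                · have := hmem 2 y hy; simp [h0, this]
                · have := hmem 3 y hy; simp [h0, this])]
        rw [hf 0, hf 1, hf 2, hf 3]
        simp [h0, sorted_append_singleton, List.append_assoc]
      · -- bucket 1
        rw [List.append_assoc, List.append_assoc,
          insertBy_append_of_false _ x _ _
            (by intro y hy; have := hmem 0 y hy; simp [h1, this]),
          List.append_assoc,
          insertBy_append_of_true _ (fun a b => decide (k2 a < k2 b)) x _ _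
            (by intro y hy; have := hmem 1 y hy; simp [h1, this])
            (by intro y hy
                simp only [List.mem_append] at hy
                rcases hy with hy | hy
                · have := hmem 2 y hy; simp [h1, this]
                · have := hmem 3 y hy; simp [h1, this])]
        rw [hf 0, hf 1, hf 2, hf 3]
        simp [h1, sorted_append_singleton, List.append_assoc]
      · -- bucket 2
        rw [List.append_assoc, List.append_assoc,
          insertBy_append_of_false _ x _ _
            (by intro y hy; have := hmem 0 y hy; simp [h2, this]),
          insertBy_append_of_false _ x _ _
            (by intro y hy; have := hmem 1 y hy; simp [h2, this]),
          insertBy_append_of_true _ (fun a b => decide (k2 a < k2 b)) x _ _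
            (by intro y hy; have := hmem 2 y hy; simp [h2, this])
            (by intro y hy; have := hmem 3 y hy; simp [h2, this])]
        rw [hf 0, hf 1, hf 2, hf 3]
        simp [h2, sorted_append_singleton, List.append_assoc]
      · -- bucket 3
        rw [List.append_assoc, List.append_assoc,
          insertBy_append_of_false _ x _ _
            (by intro y hy; have := hmem 0 y hy; simp [h3, this]),
          insertBy_append_of_false _ x _ _
            (by intro y hy; have := hmem 1 y hy; simp [h3, this]),
          insertBy_append_of_false _ x _ _
            (by intro y hy; have := hmem 2 y hy; simp [h3, this]),
          insertBy_congr _ (fun a b => decide (k2 a < k2 b)) x _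
            (by intro y hy; have := hmem 3 y hy; simp [h3, this])]
        rw [hf 0, hf 1, hf 2, hf 3]
        simp [h3, sorted_append_singleton, List.append_assoc]

theorem sortKeyA_fst (ndv : List (String × Int)) (col : List (String × String)) :
    (pvSortKeyA ndv col).1 = pvBucketB ndv col := by
  unfold pvSortKeyA pvBucketB pvColTypeB pvColTypeA pvNameB pvNameA
  split_ifs <;> rfl

theorem sortKeyA_snd (ndv : List (String × Int)) (col : List (String × String)) :
    (pvSortKeyA ndv col).2 = pvNameB col := by
  unfold pvSortKeyA pvNameB pvNameA
  split_ifs <;> rfl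

theorem bucketB_range (ndv : List (String × Int)) (col : List (String × String)) :
    pvBucketB ndv col = 0 ∨ pvBucketB ndv col = 1 ∨ pvBucketB ndv col = 2 ∨ pvBucketB ndv col = 3 := by
  unfold pvBucketB
  split_ifs <;> simp

theorem foldl_stepB_eq_filter (ndv : List (String × Int)) (columns : List (List (String × String)))
    (acc : List (List (String × String)) × List (List (String × String)) × List (List (String × String)) × List (List (String × String))) :
    columns.foldl (pvStepB ndv) acc =
      (acc.1 ++ columns.filter (fun c => pvBucketB ndv c == 0),
       acc.2.1 ++ columns.filter (fun c => pvBucketB ndv c == 1),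
       acc.2.2.1 ++ columns.filter (fun c => pvBucketB ndv c == 2),
       acc.2.2.2 ++ columns.filter (fun c => pvBucketB ndv c == 3)) := by
  induction columns generalizing acc with
  | nil => simp
  | cons c cs ih =>
      rw [List.foldl_cons, ih]
      obtain h | h | h | h := bucketB_range ndv c <;>
        · unfold pvStepB
          rw [h]
          norm_num [List.filter_cons, h]

-- ===== VERDICT (by name: the statement is the Claim_ definition above) =====
theorem prioritize_columns_py_spec : Claim_equal_prioritize_columns_py := by
  intro columns ndv _ _
  unfold Spec_prioritize_columns_py prioritize_columns_py prioritize_columns_py_alt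
  simp only [sortKeyA_fst, sortKeyA_snd]
  rw [sorted2_bucket4 columns (pvBucketB ndv) pvNameB (fun c _ => bucketB_range ndv c),
    foldl_stepB_eq_filter]
  simp
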